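-- pv_equiv track=rewrite | github.com/JohnScolaro/advent-of-code | 2020/day18/day18.py | part_b_equation_modifier
-- ===== SOURCE A (Python) =====
-- def part_b_equation_modifier(equation: str) -> str:
--     """
--     Modifies the equation strings from the input so that when parsed by the
--     dumb stack calculator I made, they actually evaluate correctly. Essentially
--     this function just adds brackets to the string to make it work.
--
--     The rules it follows are:
--         1: Copy the origional letter from the input string.
--         2: If the char is a *, add an open parenthesis after it, and keep
--             track of this additional parenthesis you added.
--         3: If the char is a (, push number of addition brackets you've added
--             at this specific level to a stack.
--         4: If the char is a ), insert X additional ')'s to the equation, where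
--             X is the total number of extra '('s you've added at this particular
--             parenthesis level.
--
--     It's dumb, and I thought it up by attempting a few equations by hand, and
--     it just kinda seemed like it would work.
--     """
--     string = ''
--     brackets_added = 0
--     num_additional_brackets = []
--     for char in equation:
--         string += char
--         if char == '*':
--             string += '('
--             brackets_added += 1
--         if char == '(':
--             num_additional_brackets.append(brackets_added)
--             brackets_added = 0
--         if char == ')':
--             string += ')' * brackets_added
--             brackets_added = num_additional_brackets.pop()
--     string += ')' * brackets_added
--     return string
-- ===== SOURCE B (Python) =====
-- def part_b_equation_modifier(equation: str) -> str:
--     """Rewrite an equation so that '+' binds tighter than '*' when evaluated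
--     left-to-right: insert '(' after each '*' and close all of a level's
--     inserted brackets when the level ends.  Implemented as a validating
--     recursive-descent rewriter (one call per parenthesis level); raises
--     ValueError on unbalanced parentheses."""
--     def parse_level(i):
--         # Rewrite one parenthesis level, stopping at its closing ')' (not
--         # consumed) or at end of input; returns (text, brackets_added, i).
--         out = []
--         added = 0
--         while i < len(equation) and equation[i] != ')':
--             c = equation[i]
--             i += 1
--             if c == '*':
--                 out.append('*(')
--                 added += 1
--             elif c == '(':
--                 inner, inner_added, i = parse_level(i)
--                 if i == len(equation):
--                     raise ValueError("unbalanced parentheses: unclosed '('")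
--                 i += 1  # consume the ')'
--                 out.append('(' + inner + ')' + ')' * inner_added)
--             else:
--                 out.append(c)
--         return ''.join(out), added, i
--     text, added, i = parse_level(0)
--     if i != len(equation):
--         raise ValueError("unbalanced parentheses: unmatched ')'")
--     return text + ')' * added
-- ===== Notes on version B (the rewrite author's own statement) =====
-- stated objective: alternative
-- what changed: Replaced the single left-to-right pass with an explicit counter stack by a validating recursive-descent rewriter (one call per parenthesis level with a local counter, the call stack doing the scoping); Pre_ excludes unbalanced equations, on which A either raises IndexError (an unmatched closing bracket) or returns a rewrite containing unclosed inserted brackets (an unclosed opening bracket), while B's validating parser raises ValueError on both.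
-- outside the precondition, e.g. on part_b_equation_modifier('2*(3'): A returns '2*((3', B raises ValueError; on part_b_equation_modifier('('): A returns '(', B raises ValueError; on part_b_equation_modifier(')'): A raises IndexError, B raises ValueError
import Mathlib
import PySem

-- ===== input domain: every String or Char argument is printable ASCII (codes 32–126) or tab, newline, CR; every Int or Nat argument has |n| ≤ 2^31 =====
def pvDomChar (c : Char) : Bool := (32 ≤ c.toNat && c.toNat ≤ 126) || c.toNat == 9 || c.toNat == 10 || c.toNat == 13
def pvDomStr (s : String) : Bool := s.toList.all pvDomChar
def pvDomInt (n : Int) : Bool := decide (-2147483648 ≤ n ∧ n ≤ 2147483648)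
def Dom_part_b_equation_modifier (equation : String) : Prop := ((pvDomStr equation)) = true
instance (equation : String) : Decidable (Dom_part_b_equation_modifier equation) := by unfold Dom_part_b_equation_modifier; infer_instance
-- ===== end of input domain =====

-- B replaces A's explicit counter stack by a validating recursive-descent rewriter
-- (one call per parenthesis level, local counter); alternative decomposition, same cost.

-- ===== PORT A =====
-- Python's ')' * b   (b is always ≥ 0 here)
def pvCloser (b : Int) : List Char := List.replicate b.toNat ')'

-- one iteration of A's for-loop; state none = IndexError already raised
-- (Python list.append/.pop() work at the right end; modeled at the list head)
def pvStepA (st : Option (List Char × Int × List Int)) (c : Char) :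
    Option (List Char × Int × List Int) :=
  match st with
  | none => none
  | some (s, b, stk) =>
    let s := s ++ [c]
    let (s, b) := if c = '*' then (s ++ ['('], b + 1) else (s, b)
    let (b, stk) := if c = '(' then ((0 : Int), b :: stk) else (b, stk)
    if c = ')' then
      match stk with
      | [] => none                                   -- .pop() on empty list: IndexError
      | b' :: stk' => some (s ++ pvCloser b, b', stk')
    else some (s, b, stk)

def part_b_equation_modifier (equation : String) : String :=
  match equation.toList.foldl pvStepA (some ([], 0, [])) with
  | some (s, b, _) => String.ofList (s ++ pvCloser b)
  | none => ""                                       -- Python raises IndexError (outside Pre_)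

-- ===== PORT B =====
-- Source B's parse_level(i): rewrites one parenthesis level of the remaining
-- characters, returning (text, brackets_added, rest) where rest starts at the
-- level's closing ')' (not consumed) or is [] at end of input; none = the
-- ValueError "unclosed '('".  Fuel = remaining length (never exhausted there).
def pvParseL : Nat → List Char → Option (List Char × Int × List Char)
  | _, [] => some ([], 0, [])
  | 0, _ :: _ => none                                -- fuel exhausted: unreachable for fuel ≥ length
  | f + 1, c :: rest =>
    if c = ')' then some ([], 0, ')' :: rest)        -- stop, ')' not consumed
    else if c = '*' then
      match pvParseL f rest with
      | some (o, a, r) => some ('*' :: '(' :: o, a + 1, r)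
      | none => none
    else if c = '(' then
      match pvParseL f rest with
      | some (o, a, r) =>
        match r with
        | ')' :: r' =>                               -- consume the ')', flush inner closers, keep looping
          match pvParseL f r' with
          | some (o2, a2, r2) => some ('(' :: o ++ ')' :: pvCloser a ++ o2, a2, r2)
          | none => none
        | _ => none                                  -- end of input: ValueError "unclosed '('"
      | none => none
    else
      match pvParseL f rest with
      | some (o, a, r) => some (c :: o, a, r)
      | none => none

def part_b_equation_modifier_alt (equation : String) : String :=
  match pvParseL equation.toList.length equation.toList with
  | some (o, a, []) => String.ofList (o ++ pvCloser a)
  | some (_, _, _ :: _) => ""                        -- Python raises ValueError "unmatched ')'" (outside Pre_)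
  | none => ""                                       -- Python raises ValueError "unclosed '('" (outside Pre_)

-- ===== PRECONDITION & SPEC =====
-- Pre_ excludes the unbalanced equations: there A either raises IndexError (an
-- unmatched closing bracket) or returns a rewrite containing unclosed inserted
-- brackets (an unclosed opening bracket), while B's validating parser raises ValueError.
def Pre_part_b_equation_modifier (equation : String) : Prop :=
  (∀ p ∈ equation.toList.inits, p.count ')' ≤ p.count '(') ∧
    equation.toList.count '(' = equation.toList.count ')'
instance (equation : String) : Decidable (Pre_part_b_equation_modifier equation) := by
  unfold Pre_part_b_equation_modifier; infer_instance

def pvWitness_part_b_equation_modifier : String := "1+2*(3*4+5)"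

def Spec_part_b_equation_modifier (equation : String) (out : String) : Prop :=
  out = part_b_equation_modifier_alt equation
instance (equation : String) (out : String) : Decidable (Spec_part_b_equation_modifier equation out) := by
  unfold Spec_part_b_equation_modifier; infer_instance

-- ===== CLAIM (what is proved, stated in full; the proofs are below) =====
def Claim_equal_part_b_equation_modifier : Prop :=
  ∀ (equation : String), Dom_part_b_equation_modifier equation →
    Pre_part_b_equation_modifier equation →
    Spec_part_b_equation_modifier equation (part_b_equation_modifier equation)

-- ===== LEMMAS AND PROOFS =====

-- signed parenthesis balance
def pvBal (cs : List Char) : Int := (cs.count '(' : Int) - (cs.count ')' : Int)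

-- prefix-validity: no prefix closes more than it opens
def pvPV (cs : List Char) : Prop := ∀ p, p <+: cs → 0 ≤ pvBal p

theorem pvBal_append (u v : List Char) : pvBal (u ++ v) = pvBal u + pvBal v := by
  simp [pvBal, List.count_append]; ring

theorem pvBal_cons (c : Char) (p : List Char) : pvBal (c :: p) = pvBal [c] + pvBal p := by
  simpa using pvBal_append [c] p

theorem pvBal_single_nonneg (c : Char) (h : c ≠ ')') : 0 ≤ pvBal [c] := by
  simp [pvBal, List.count_cons, List.count_nil]
  split_ifs with h1 h2 <;> simp_all

theorem pvBal_single_zero (c : Char) (h1 : c ≠ '(') (h2 : c ≠ ')') : pvBal [c] = 0 := by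
  simp [pvBal, List.count_cons, List.count_nil]
  split_ifs <;> simp_all

theorem pvBal_open : pvBal ['('] = 1 := by decide

theorem pvBal_close : pvBal [')'] = -1 := by decide

theorem pvPV_nil : pvPV [] := by
  intro p hp
  simp [List.prefix_nil] at hp
  simp [hp, pvBal]

theorem pvPV_cons_zero (c : Char) (cs : List Char) (h : pvPV (c :: cs)) (hc : pvBal [c] = 0) :
    pvPV cs := by
  intro p hp
  have h1 := h (c :: p) (List.cons_prefix_cons.mpr ⟨rfl, hp⟩)
  rw [pvBal_cons, hc] at h1
  omega

theorem pvPrefix_cases {α : Type} (u : List α) (v : List α) (p : List α) (h : p <+: u ++ v) :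
    p <+: u ∨ ∃ q, p = u ++ q ∧ q <+: v := by
  induction u generalizing p with
  | nil => exact Or.inr ⟨p, by simp, by simpa using h⟩
  | cons a u ih =>
    cases p with
    | nil => exact Or.inl (List.nil_prefix)
    | cons b p' =>
      rw [List.cons_append] at h
      obtain ⟨hb, hp⟩ := List.cons_prefix_cons.mp h
      rcases ih p' hp with h1 | ⟨q, hq1, hq2⟩
      · exact Or.inl (List.cons_prefix_cons.mpr ⟨hb, h1⟩)
      · exact Or.inr ⟨q, by simp [hb, hq1], hq2⟩

-- Dyck factorization: a list with negative balance splits at its first unmatched ')'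
theorem pvDyck : ∀ (n : Nat) (cs : List Char), cs.length ≤ n → pvBal cs < 0 →
    ∃ b1 b2, cs = b1 ++ ')' :: b2 ∧ pvPV b1 ∧ pvBal b1 = 0 := by
  intro n
  induction n with
  | zero =>
    intro cs h hb
    have : cs = [] := List.length_eq_zero_iff.mp (Nat.le_zero.mp h)
    subst this; simp [pvBal] at hb
  | succ n ih =>
    intro cs h hb
    cases cs with
    | nil => simp [pvBal] at hb
    | cons c rest =>
      simp at h
      by_cases hcl : c = ')'
      · exact ⟨[], rest, by simp [hcl], pvPV_nil, by simp [pvBal]⟩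
      · have hrest : pvBal rest < 0 := by
          have h1 := pvBal_cons c rest
          have h2 := pvBal_single_nonneg c hcl
          omega
        obtain ⟨c1, c2, he, hpv, hbal⟩ := ih rest h hrest
        by_cases hop : c = '('
        · -- the matching ')' of this '(' is c1's unmatched ')'; recurse past it
          subst hop
          have hc2 : pvBal c2 < 0 := by
            have h1 := pvBal_cons '(' rest
            have h2 : pvBal rest = pvBal c1 + pvBal (')' :: c2) := by
              rw [he]; exact pvBal_append c1 (')' :: c2)
            have h3 := pvBal_cons ')' c2
            rw [pvBal_open] at h1
            rw [pvBal_close] at h3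
            omega
          have hlen : c2.length ≤ n := by
            have h9 : rest.length = c1.length + (c2.length + 1) := by simp [he]
            omega
          obtain ⟨d1, d2, he2, hpv2, hbal2⟩ := ih c2 (by omega) hc2
          refine ⟨'(' :: c1 ++ ')' :: d1, d2, by simp [he, he2], ?_, ?_⟩
          · intro p hp
            cases p with
            | nil => simp [pvBal]
            | cons x q =>
              obtain ⟨hx, hq⟩ := List.cons_prefix_cons.mp hp
              subst hx
              rcases pvPrefix_cases c1 (')' :: d1) q hq with h1 | ⟨q', hq1, hq2⟩
              · have := hpv q h1
                rw [pvBal_cons, pvBal_open]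
                omega
              · subst hq1
                rw [pvBal_cons, pvBal_open, pvBal_append]
                cases q' with
                | nil =>
                  have h0 : pvBal ([] : List Char) = 0 := by decide
                  omega
                | cons y q'' =>
                  obtain ⟨hy, hq''⟩ := List.cons_prefix_cons.mp hq2
                  subst hy
                  have := hpv2 q'' hq''
                  rw [pvBal_cons, pvBal_close]
                  omega
          · simp only [List.cons_append]
            have e1 := pvBal_cons '(' (c1 ++ ')' :: d1)
            have e2 := pvBal_append c1 (')' :: d1)
            have e3 := pvBal_cons ')' d1
            rw [pvBal_open] at e1
            rw [pvBal_close] at e3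
            omega
        · -- an ordinary character: shift the factorization by one
          refine ⟨c :: c1, c2, by simp [he], ?_, ?_⟩
          · intro p hp
            cases p with
            | nil => simp [pvBal]
            | cons x q =>
              obtain ⟨hx, hq⟩ := List.cons_prefix_cons.mp hp
              have h8 := hpv q hq
              rw [hx, pvBal_cons, pvBal_single_zero c hop hcl]
              omega
          · rw [pvBal_cons, pvBal_single_zero c hop hcl]
            omega

-- progress: on a balanced level body followed by nothing or a ')', B's parse
-- succeeds and stops exactly at that tail
theorem pvSM : ∀ (f : Nat) (body tail : List Char), (body ++ tail).length ≤ f →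
    pvPV body → pvBal body = 0 → (tail = [] ∨ ∃ t', tail = ')' :: t') →
    ∃ o a, pvParseL f (body ++ tail) = some (o, a, tail) := by
  intro f
  induction f with
  | zero =>
    intro body tail h _ _ htail
    obtain ⟨h1, h2⟩ : body = [] ∧ tail = [] := by simpa using h
    subst h1; subst h2
    exact ⟨[], 0, by simp [pvParseL]⟩
  | succ f ih =>
    intro body tail h hpv hbal htail
    cases body with
    | nil =>
      rcases htail with h1 | ⟨t', h1⟩
      · subst h1; exact ⟨[], 0, by simp [pvParseL]⟩
      · subst h1; exact ⟨[], 0, by simp [pvParseL]⟩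
    | cons c b' =>
      simp at h
      by_cases hcl : c = ')'
      · exfalso
        have := hpv [c] ⟨b', rfl⟩
        rw [hcl, pvBal_close] at this
        omega
      · by_cases hst : c = '*'
        · subst hst
          have hpv' : pvPV b' := pvPV_cons_zero '*' b' hpv (by decide)
          have hbal' : pvBal b' = 0 := by
            have h1 := pvBal_cons '*' b'
            have h0 : pvBal ['*'] = 0 := by decide
            rw [h0] at h1; omega
          obtain ⟨o, a, hp⟩ := ih b' tail (by simp; omega) hpv' hbal' htail
          exact ⟨'*' :: '(' :: o, a + 1, by simp [pvParseL, hp]⟩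
        · by_cases hop : c = '('
          · subst hop
            have hb' : pvBal b' = -1 := by
              have h1 := pvBal_cons '(' b'
              rw [pvBal_open] at h1
              omega
            obtain ⟨c1, c2, he, hpv1, hbal1⟩ := pvDyck b'.length b' le_rfl (by omega)
            have hbal2 : pvBal c2 = 0 := by
              have h1 : pvBal b' = pvBal c1 + pvBal (')' :: c2) := by
                rw [he]; exact pvBal_append c1 (')' :: c2)
              have h2 := pvBal_cons ')' c2
              rw [pvBal_close] at h2
              omega
            have hpv2 : pvPV c2 := by
              intro p hp
              obtain ⟨t, ht⟩ := hp
              have h9 := hpv ('(' :: (c1 ++ ')' :: p))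
                ⟨t, by simp [he, ← ht]⟩
              have e1 := pvBal_cons '(' (c1 ++ ')' :: p)
              have e2 := pvBal_append c1 (')' :: p)
              have e3 := pvBal_cons ')' p
              rw [pvBal_open] at e1
              rw [pvBal_close] at e3
              omega
            have e1 : b' ++ tail = c1 ++ ')' :: (c2 ++ tail) := by simp [he]
            have hlen1 : (c1 ++ ')' :: (c2 ++ tail)).length ≤ f := by
              have h9 : b'.length = c1.length + (c2.length + 1) := by simp [he]
              simp
              omega
            obtain ⟨o1, a1, hp1⟩ := ih c1 (')' :: (c2 ++ tail)) hlen1 hpv1 hbal1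
              (Or.inr ⟨c2 ++ tail, rfl⟩)
            have hlen2 : (c2 ++ tail).length ≤ f := by
              have h9 : b'.length = c1.length + (c2.length + 1) := by simp [he]
              simp
              omega
            obtain ⟨o2, a2, hp2⟩ := ih c2 tail hlen2 hpv2 hbal2 htail
            refine ⟨'(' :: o1 ++ ')' :: pvCloser a1 ++ o2, a2, ?_⟩
            rw [show ('(' :: b' ++ tail) = '(' :: (b' ++ tail) by simp]
            rw [e1]
            simp [pvParseL, hp1, hp2]
          · have hpv' : pvPV b' := pvPV_cons_zero c b' hpv (pvBal_single_zero c hop hcl)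
            have hbal' : pvBal b' = 0 := by
              have h1 := pvBal_cons c b'
              rw [pvBal_single_zero c hop hcl] at h1
              omega
            obtain ⟨o, a, hp⟩ := ih b' tail (by simp; omega) hpv' hbal' htail
            exact ⟨c :: o, a, by simp [pvParseL, hcl, hst, hop, hp]⟩

-- simulation: B's level output and counter against A's left fold over the consumed characters
theorem pvParseL_sim : ∀ (f : Nat) (cs o : List Char) (a : Int) (r : List Char),
    pvParseL f cs = some (o, a, r) →
    ∃ w, cs = w ++ r ∧
      ∀ s b stk, List.foldl pvStepA (some (s, b, stk)) w = some (s ++ o, b + a, stk) := by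
  intro f
  induction f with
  | zero =>
    intro cs o a r h
    cases cs with
    | nil =>
      simp [pvParseL] at h
      obtain ⟨h1, h2, h3⟩ := h
      subst h1; subst h2; subst h3
      exact ⟨[], by simp, fun s b stk => by simp⟩
    | cons c rest => simp [pvParseL] at h
  | succ f ih =>
    intro cs o a r h
    cases cs with
    | nil =>
      simp [pvParseL] at h
      obtain ⟨h1, h2, h3⟩ := h
      subst h1; subst h2; subst h3
      exact ⟨[], by simp, fun s b stk => by simp⟩
    | cons c rest =>
      by_cases hcl : c = ')'
      · subst hcl
        simp [pvParseL] at h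
        obtain ⟨h1, h2, h3⟩ := h
        subst h1; subst h2; subst h3
        exact ⟨[], by simp, fun s b stk => by simp⟩
      · by_cases hst : c = '*'
        · subst hst
          simp [pvParseL] at h
          rcases hp : pvParseL f rest with _ | ⟨o1, a1, r1⟩ <;> rw [hp] at h
          · simp at h
          · simp at h
            obtain ⟨h1, h2, h3⟩ := h
            obtain ⟨w1, hw1, hfold⟩ := ih rest o1 a1 r1 hp
            refine ⟨'*' :: w1, by simp [hw1, h3], fun s b stk => ?_⟩
            have hstep : pvStepA (some (s, b, stk)) '*' = some (s ++ ['*', '('], b + 1, stk) := by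
              simp [pvStepA]
            rw [List.foldl_cons, hstep, hfold]
            subst h1; subst h2
            simp
            omega
        · by_cases hop : c = '('
          · subst hop
            simp [pvParseL] at h
            rcases hp : pvParseL f rest with _ | ⟨o1, a1, r1⟩ <;> rw [hp] at h
            · simp at h
            · cases r1 with
              | nil => simp at h
              | cons d r1' =>
                by_cases hd : d = ')'
                · subst hd
                  simp at h
                  rcases hq : pvParseL f r1' with _ | ⟨o2, a2, r2⟩ <;> rw [hq] at h
                  · simp at h
                  · simp at h
                    obtain ⟨h1, h2, h3⟩ := h
                    obtain ⟨w1, hw1, hfold1⟩ := ih rest o1 a1 (')' :: r1') hp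
                    obtain ⟨w2, hw2, hfold2⟩ := ih r1' o2 a2 r2 hq
                    refine ⟨'(' :: w1 ++ ')' :: w2, by simp [hw1, hw2, h3], fun s b stk => ?_⟩
                    have hstep1 : pvStepA (some (s, b, stk)) '(' = some (s ++ ['('], 0, b :: stk) := by
                      simp [pvStepA]
                    have hstep2 : ∀ S B STK (rest' : List Int),
                        pvStepA (some (S, B, (STK : Int) :: rest')) ')'
                          = some (S ++ [')'] ++ pvCloser B, STK, rest') := by
                      intro S B STK rest'
                      simp [pvStepA]
                    rw [show ('(' :: w1 ++ ')' :: w2) = '(' :: (w1 ++ ')' :: w2) by simp]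
                    rw [List.foldl_cons, hstep1]
                    rw [List.foldl_append]
                    rw [hfold1]
                    rw [List.foldl_cons, hstep2]
                    rw [hfold2]
                    subst h1; subst h2
                    simp
                · simp [hd] at h
          · simp [pvParseL, hcl, hst, hop] at h
            rcases hp : pvParseL f rest with _ | ⟨o1, a1, r1⟩ <;> rw [hp] at h
            · simp at h
            · simp at h
              obtain ⟨h1, h2, h3⟩ := h
              obtain ⟨w1, hw1, hfold⟩ := ih rest o1 a1 r1 hp
              refine ⟨c :: w1, by simp [hw1, h3], fun s b stk => ?_⟩
              have hstep : pvStepA (some (s, b, stk)) c = some (s ++ [c], b, stk) := by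
                simp [pvStepA, hcl, hst, hop]
              rw [List.foldl_cons, hstep, hfold]
              subst h1; subst h2
              simp

-- ===== VERDICT (by name: the statement is the Claim_ definition above) =====
theorem part_b_equation_modifier_spec : Claim_equal_part_b_equation_modifier := by
  intro equation _ hpre
  unfold Spec_part_b_equation_modifier part_b_equation_modifier part_b_equation_modifier_alt
  obtain ⟨hpv0, hcnt⟩ := hpre
  set cs := equation.toList with hcs
  have hpv : pvPV cs := by
    intro p hp
    have := hpv0 p ((List.mem_inits p cs).mpr hp)
    simp [pvBal]; omega
  have hbal : pvBal cs = 0 := by simp [pvBal, hcnt]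
  obtain ⟨o, a, hp⟩ := pvSM cs.length cs [] (by simp) hpv hbal (Or.inl rfl)
  simp at hp
  obtain ⟨w, hw, hfold⟩ := pvParseL_sim cs.length cs o a [] hp
  simp at hw
  have hf := hfold [] 0 []
  rw [← hw] at hf
  simp at hf
  rw [hf, hp]
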